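-- pv_equiv track=rewrite | github.com/JJTB100/AdventOfCode | 2023/2023Day13.py | isReflection
-- ===== SOURCE A (Python) =====
-- def isReflection(i, m):
--     j = i + 1
--     while 0 <= i and j < len(m):
--         if m[i] == m[j]:
--             i -= 1
--             j += 1
--             continue
--         else:
--             return False
--     return True
-- ===== SOURCE B (Python) =====
-- def isReflection(i, m):
--     if i < 0:
--         return True
--     n = min(i + 1, len(m) - i - 1)
--     return m[i - n + 1:i + 1] == m[i + 1:i + n + 1][::-1]
-- ===== Notes on version B (the rewrite author's own statement) =====
-- stated objective: simpler
-- what changed: Replaces the incremental two-pointer while loop with a single computation: the overlap half-length n is computed once and the block ending at i is compared wholesale against the reversed block starting at i+1.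
import Mathlib
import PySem

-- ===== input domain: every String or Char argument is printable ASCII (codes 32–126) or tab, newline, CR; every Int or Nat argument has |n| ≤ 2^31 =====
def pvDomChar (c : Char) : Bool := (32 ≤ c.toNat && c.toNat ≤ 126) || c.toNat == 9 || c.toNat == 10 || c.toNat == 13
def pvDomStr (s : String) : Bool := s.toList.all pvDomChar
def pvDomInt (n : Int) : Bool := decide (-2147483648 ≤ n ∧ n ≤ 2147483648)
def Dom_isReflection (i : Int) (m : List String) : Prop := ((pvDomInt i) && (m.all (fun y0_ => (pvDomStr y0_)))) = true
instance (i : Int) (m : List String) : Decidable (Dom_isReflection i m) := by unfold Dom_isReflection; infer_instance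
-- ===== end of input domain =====

-- B replaces A's incremental two-pointer while loop by one slice comparison; objective: simpler (return value only; no mutation involved).

-- ===== PORT A =====
-- the while loop of A, step for step: state (i, j), guard 0 <= i and j < len(m)
def isReflectionLoop (m : List String) (i j : Int) : Bool :=
  if h : 0 ≤ i ∧ j < (m.length : Int) then
    if PySem.List.pyGet? m i = PySem.List.pyGet? m j then
      isReflectionLoop m (i - 1) (j + 1)
    else
      false
  else
    true
termination_by ((m.length : Int) - j).toNat
decreasing_by omega

def isReflection (i : Int) (m : List String) : Bool :=
  isReflectionLoop m i (i + 1)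

-- ===== PORT B =====
def isReflection_alt (i : Int) (m : List String) : Bool :=
  if i < 0 then
    true
  else
    let n : Int := min (i + 1) ((m.length : Int) - i - 1)
    PySem.List.slice m (some (i - n + 1)) (some (i + 1))
      == (PySem.List.slice m (some (i + 1)) (some (i + n + 1))).reverse

-- ===== PRECONDITION & SPEC =====
def Spec_isReflection (i : Int) (m : List String) (out : Bool) : Prop := out = isReflection_alt i m
instance (i : Int) (m : List String) (out : Bool) : Decidable (Spec_isReflection i m out) := by unfold Spec_isReflection; infer_instance

-- ===== CLAIM (what is proved, stated in full; the proofs are below) =====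
def Claim_equal_isReflection : Prop := ∀ (i : Int) (m : List String), Dom_isReflection i m → Spec_isReflection i m (isReflection i m)

-- ===== LEMMAS AND PROOFS =====

-- A's loop returns true iff every in-range mirror pair agrees
theorem isReflectionLoop_eq_true_iff (m : List String) (i j : Int) :
    isReflectionLoop m i j = true ↔
      ∀ k : Nat, 0 ≤ i - k → j + k < (m.length : Int) →
        PySem.List.pyGet? m (i - k) = PySem.List.pyGet? m (j + k) := by
  fun_induction isReflectionLoop m i j with
  | case1 i j h heq ih =>
      rw [ih]
      constructor
      · intro hall k hk1 hk2
        cases k with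
        | zero => simpa using heq
        | succ k =>
            have := hall k (by omega) (by omega)
            rw [show i - ((k+1 : Nat) : Int) = i - 1 - k by push_cast; ring,
                show j + ((k+1 : Nat) : Int) = j + 1 + k by push_cast; ring]
            exact this
      · intro hall k hk1 hk2
        have := hall (k+1) (by push_cast; omega) (by push_cast; omega)
        rw [show i - ((k+1 : Nat) : Int) = i - 1 - k by push_cast; ring,
            show j + ((k+1 : Nat) : Int) = j + 1 + k by push_cast; ring] at this
        exact this
  | case2 i j h heq =>
      simp only [Bool.false_eq_true, false_iff]
      intro hall
      exact heq (by simpa using hall 0 (by omega) (by omega))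
  | case3 i j h =>
      simp only [true_iff]
      intro k hk1 hk2
      exfalso; omega

-- B returns true iff every in-range mirror pair agrees (for 0 ≤ i)
theorem isReflection_alt_eq_true_iff (i : Int) (m : List String) (hi : 0 ≤ i) :
    isReflection_alt i m = true ↔
      ∀ k : Nat, 0 ≤ i - k → i + 1 + k < (m.length : Int) →
        PySem.List.pyGet? m (i - k) = PySem.List.pyGet? m (i + 1 + k) := by
  have hilt : ¬ i < 0 := not_lt.mpr hi
  simp only [isReflection_alt, if_neg hilt, beq_iff_eq]
  set n : Int := min (i + 1) ((m.length : Int) - i - 1) with hn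
  by_cases hN : (m.length : Int) ≤ i + 1
  · -- no row below the line: both slices are empty and the condition is vacuous
    have hnle : n ≤ (m.length : Int) - i - 1 := min_le_right _ _
    have e1 : PySem.List.slice m (some (i - n + 1)) (some (i + 1)) = [] := by
      rw [PySem.List.slice_toNat m (by omega) (by omega)]
      have : (i + 1).toNat - (i - n + 1).toNat = 0 := by omega
      rw [this, List.take_zero]
    have e2 : PySem.List.slice m (some (i + 1)) (some (i + n + 1)) = [] := by
      rw [PySem.List.slice_toNat m (by omega) (by omega)]
      have : (i + n + 1).toNat - (i + 1).toNat = 0 := by omega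
      rw [this, List.take_zero]
    rw [e1, e2]
    simp only [List.reverse_nil, true_iff]
    intro k hk1 hk2
    exfalso; omega
  · -- proper overlap: n ≥ 1
    rw [not_le] at hN
    have hn1 : 1 ≤ n := by omega
    have hnle1 : n ≤ i + 1 := min_le_left _ _
    have hnle2 : n ≤ (m.length : Int) - i - 1 := min_le_right _ _
    set p : Nat := i.toNat with hp
    have hip : i = (p : Int) := by omega
    set nn : Nat := n.toNat with hnn
    have hin : n = (nn : Int) := by omega
    have e1 : PySem.List.slice m (some (i - n + 1)) (some (i + 1))
        = (m.drop (p + 1 - nn)).take nn := by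
      rw [PySem.List.slice_toNat m (by omega) (by omega)]
      have h1 : (i - n + 1).toNat = p + 1 - nn := by omega
      rw [h1]; congr 1; omega
    have e2 : PySem.List.slice m (some (i + 1)) (some (i + n + 1))
        = (m.drop (p + 1)).take nn := by
      rw [PySem.List.slice_toNat m (by omega) (by omega)]
      have h1 : (i + 1).toNat = p + 1 := by omega
      rw [h1]; congr 1; omega
    rw [e1, e2]
    have hlen1 : ((m.drop (p + 1 - nn)).take nn).length = nn := by
      simp [List.length_take, List.length_drop]; omega
    have hlen2 : ((m.drop (p + 1)).take nn).length = nn := by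
      simp [List.length_take, List.length_drop]; omega
    constructor
    · intro heq k hk1 hk2
      have hklt : k < nn := by omega
      have hkp : k ≤ p := by omega
      have ht := congrArg (fun l => l[nn - 1 - k]?) heq
      simp only [List.getElem?_take, List.getElem?_drop] at ht
      rw [List.getElem?_reverse (by omega), hlen2] at ht
      simp only [List.getElem?_take, List.getElem?_drop] at ht
      rw [if_pos (by omega), if_pos (by omega)] at ht
      rw [show p + 1 - nn + (nn - 1 - k) = p - k by omega,
          show p + 1 + (nn - 1 - (nn - 1 - k)) = p + 1 + k by omega] at ht
      rw [show i - (k : Int) = ((p - k : Nat) : Int) by omega,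
          show i + 1 + (k : Int) = ((p + 1 + k : Nat) : Int) by omega,
          PySem.List.pyGet?_natCast, PySem.List.pyGet?_natCast]
      exact ht
    · intro hall
      apply List.ext_getElem?
      intro t
      by_cases htn : t < nn
      · rw [List.getElem?_reverse (by omega), hlen2]
        simp only [List.getElem?_take, List.getElem?_drop]
        rw [if_pos htn, if_pos (by omega)]
        have := hall (nn - 1 - t) (by omega) (by omega)
        rw [show i - ((nn - 1 - t : Nat) : Int) = ((p + 1 - nn + t : Nat) : Int) by omega,
            show i + 1 + ((nn - 1 - t : Nat) : Int) = ((p + 1 + (nn - 1 - t) : Nat) : Int) by omega,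
            PySem.List.pyGet?_natCast, PySem.List.pyGet?_natCast] at this
        exact this
      · rw [List.getElem?_eq_none (by omega), List.getElem?_eq_none (by simp [hlen2]; omega)]

-- ===== VERDICT (by name: the statement is the Claim_ definition above) =====
theorem isReflection_spec : Claim_equal_isReflection := by
  intro i m _
  unfold Spec_isReflection isReflection
  by_cases hi : i < 0
  · rw [isReflectionLoop]
    simp [isReflection_alt, hi]
  · rw [not_lt] at hi
    have h1 := isReflectionLoop_eq_true_iff m i (i + 1)
    have h2 := isReflection_alt_eq_true_iff i m hi
    apply Bool.eq_iff_iff.mpr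
    rw [h1, h2]
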